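-- pv_equiv track=rewrite | github.com/TriMerz/assas-public | dataet.py | get_astec_indices
-- ===== SOURCE A (Python) =====
-- def get_astec_indices(n_features):
--     """
--     Funzione per estrarre indici basata su outliers.py
--     """
--     indices = {
--         "Steam Partial-Pressure": [],
--         "Hydrogen Partial-Pressure": [],
--         "Void Fraction": [],
--         "Void Fraction SWALLEN": [],
--         "Gas Temperature": [],
--         "Liquid Temperature": [],
--         "Gas Velocity": [],
--         "Liquid Speed": [],
--         "Rotary Speed": [],
--         "Surface Temperature 1": [],
--         "Surface Temperature 2": []
--     }
--
--     # Volumi 0-77 (0-389): 5 variabili per volume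
--     for i in range(0, min(390, n_features), 5):
--         if i < n_features: indices["Steam Partial-Pressure"].append(i)
--         if i+1 < n_features: indices["Hydrogen Partial-Pressure"].append(i+1)
--         if i+2 < n_features: indices["Void Fraction"].append(i+2)
--         if i+3 < n_features: indices["Gas Temperature"].append(i+3)
--         if i+4 < n_features: indices["Liquid Temperature"].append(i+4)
--
--     # Volumi 78-79 (390-401): 6 variabili per volume (con SWALLEN)
--     for i in range(390, min(402, n_features), 6):
--         if i < n_features: indices["Steam Partial-Pressure"].append(i)
--         if i+1 < n_features: indices["Hydrogen Partial-Pressure"].append(i+1)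
--         if i+2 < n_features: indices["Void Fraction"].append(i+2)
--         if i+3 < n_features: indices["Gas Temperature"].append(i+3)
--         if i+4 < n_features: indices["Liquid Temperature"].append(i+4)
--         if i+5 < n_features: indices["Void Fraction SWALLEN"].append(i+5)
--
--     # Volumi 80-160 (402-806): 5 variabili per volume
--     for i in range(402, min(807, n_features), 5):
--         if i < n_features: indices["Steam Partial-Pressure"].append(i)
--         if i+1 < n_features: indices["Hydrogen Partial-Pressure"].append(i+1)
--         if i+2 < n_features: indices["Void Fraction"].append(i+2)
--         if i+3 < n_features: indices["Gas Temperature"].append(i+3)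
--         if i+4 < n_features: indices["Liquid Temperature"].append(i+4)
--
--     # Volumi 161-165 (807-836): 6 variabili per volume (con SWALLEN)
--     for i in range(807, min(837, n_features), 6):
--         if i < n_features: indices["Steam Partial-Pressure"].append(i)
--         if i+1 < n_features: indices["Hydrogen Partial-Pressure"].append(i+1)
--         if i+2 < n_features: indices["Void Fraction"].append(i+2)
--         if i+3 < n_features: indices["Gas Temperature"].append(i+3)
--         if i+4 < n_features: indices["Liquid Temperature"].append(i+4)
--         if i+5 < n_features: indices["Void Fraction SWALLEN"].append(i+5)
--
--     # Volumi 166-233 (837-1176): 5 variabili per volume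
--     for i in range(837, min(1177, n_features), 5):
--         if i < n_features: indices["Steam Partial-Pressure"].append(i)
--         if i+1 < n_features: indices["Hydrogen Partial-Pressure"].append(i+1)
--         if i+2 < n_features: indices["Void Fraction"].append(i+2)
--         if i+3 < n_features: indices["Gas Temperature"].append(i+3)
--         if i+4 < n_features: indices["Liquid Temperature"].append(i+4)
--
--     # Junction (1177-1794): 2 variabili per junction
--     for i in range(1177, min(1795, n_features), 2):
--         if i < n_features: indices["Gas Velocity"].append(i)
--         if i+1 < n_features: indices["Liquid Speed"].append(i+1)
--
--     # Pumps (1795-1798): 1 variabile per pump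
--     for i in range(1795, min(1799, n_features)):
--         if i < n_features: indices["Rotary Speed"].append(i)
--
--     # Walls (1799-2232): 2 variabili per wall
--     for i in range(1799, min(n_features, 2233), 2):
--         if i < n_features: indices["Surface Temperature 1"].append(i)
--         if i+1 < n_features: indices["Surface Temperature 2"].append(i+1)
--
--     return indices
-- ===== SOURCE B (Python) =====
-- _FIVE = ["Steam Partial-Pressure", "Hydrogen Partial-Pressure", "Void Fraction",
--          "Gas Temperature", "Liquid Temperature"]
-- _SIX = _FIVE + ["Void Fraction SWALLEN"]
--
-- _KEYS = ["Steam Partial-Pressure", "Hydrogen Partial-Pressure", "Void Fraction",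
--          "Void Fraction SWALLEN", "Gas Temperature", "Liquid Temperature",
--          "Gas Velocity", "Liquid Speed", "Rotary Speed",
--          "Surface Temperature 1", "Surface Temperature 2"]
--
-- _SEGMENTS = [
--     (0, 390, 5, _FIVE),
--     (390, 402, 6, _SIX),
--     (402, 807, 5, _FIVE),
--     (807, 837, 6, _SIX),
--     (837, 1177, 5, _FIVE),
--     (1177, 1795, 2, ["Gas Velocity", "Liquid Speed"]),
--     (1795, 1799, 1, ["Rotary Speed"]),
--     (1799, 2233, 2, ["Surface Temperature 1", "Surface Temperature 2"]),
-- ]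
--
-- def get_astec_indices(n_features):
--     indices = {k: [] for k in _KEYS}
--     m = min(n_features, 2233)
--     for start, end, step, cats in _SEGMENTS:
--         for j in range(start, min(end, m)):
--             indices[cats[(j - start) % step]].append(j)
--     return indices
-- ===== Notes on version B (the rewrite author's own statement) =====
-- stated objective: simpler
-- what changed: Replaces the eight hand-written boundary loops with per-key if-chains by a data table of (start, end, block_size, categories) segments and one uniform unit-stride scan that appends each index to the category named by its offset within the block.
import Mathlib
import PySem

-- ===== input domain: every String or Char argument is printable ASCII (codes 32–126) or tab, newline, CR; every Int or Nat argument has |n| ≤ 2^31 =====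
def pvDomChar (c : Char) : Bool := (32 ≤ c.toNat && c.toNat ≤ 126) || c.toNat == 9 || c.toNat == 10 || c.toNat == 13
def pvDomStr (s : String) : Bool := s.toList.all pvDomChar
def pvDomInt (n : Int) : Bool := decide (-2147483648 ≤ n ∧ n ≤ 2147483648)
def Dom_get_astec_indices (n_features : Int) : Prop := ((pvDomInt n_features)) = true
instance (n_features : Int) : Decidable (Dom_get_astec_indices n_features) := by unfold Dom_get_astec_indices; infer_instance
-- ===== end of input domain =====

-- B replaces A's eight hand-written boundary loops (each with its own if-chain of appends)
-- by a table of (start, end, block_size, categories) segments and one uniform unit-stride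
-- scan appending each index to the category named by its offset in the block (objective: simpler).

-- ===== PORT A =====
def get_astec_indices (n_features : Int) : List (String × List Int) :=
  let indices : PySem.Dict String (List Int) := PySem.Dict.ofList
    [("Steam Partial-Pressure", []), ("Hydrogen Partial-Pressure", []), ("Void Fraction", []),
     ("Void Fraction SWALLEN", []), ("Gas Temperature", []), ("Liquid Temperature", []),
     ("Gas Velocity", []), ("Liquid Speed", []), ("Rotary Speed", []),
     ("Surface Temperature 1", []), ("Surface Temperature 2", [])]
  -- Volumi 0-77 (0-389): 5 variabili per volume
  let indices := (PySem.List.pyRange 0 (min 390 n_features) 5).foldl (fun d i =>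
    let d := if i < n_features then d.modify "Steam Partial-Pressure" [] (· ++ [i]) else d
    let d := if i+1 < n_features then d.modify "Hydrogen Partial-Pressure" [] (· ++ [i+1]) else d
    let d := if i+2 < n_features then d.modify "Void Fraction" [] (· ++ [i+2]) else d
    let d := if i+3 < n_features then d.modify "Gas Temperature" [] (· ++ [i+3]) else d
    let d := if i+4 < n_features then d.modify "Liquid Temperature" [] (· ++ [i+4]) else d
    d) indices
  -- Volumi 78-79 (390-401): 6 variabili per volume (con SWALLEN)
  let indices := (PySem.List.pyRange 390 (min 402 n_features) 6).foldl (fun d i =>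
    let d := if i < n_features then d.modify "Steam Partial-Pressure" [] (· ++ [i]) else d
    let d := if i+1 < n_features then d.modify "Hydrogen Partial-Pressure" [] (· ++ [i+1]) else d
    let d := if i+2 < n_features then d.modify "Void Fraction" [] (· ++ [i+2]) else d
    let d := if i+3 < n_features then d.modify "Gas Temperature" [] (· ++ [i+3]) else d
    let d := if i+4 < n_features then d.modify "Liquid Temperature" [] (· ++ [i+4]) else d
    let d := if i+5 < n_features then d.modify "Void Fraction SWALLEN" [] (· ++ [i+5]) else d
    d) indices
  -- Volumi 80-160 (402-806): 5 variabili per volume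
  let indices := (PySem.List.pyRange 402 (min 807 n_features) 5).foldl (fun d i =>
    let d := if i < n_features then d.modify "Steam Partial-Pressure" [] (· ++ [i]) else d
    let d := if i+1 < n_features then d.modify "Hydrogen Partial-Pressure" [] (· ++ [i+1]) else d
    let d := if i+2 < n_features then d.modify "Void Fraction" [] (· ++ [i+2]) else d
    let d := if i+3 < n_features then d.modify "Gas Temperature" [] (· ++ [i+3]) else d
    let d := if i+4 < n_features then d.modify "Liquid Temperature" [] (· ++ [i+4]) else d
    d) indices
  -- Volumi 161-165 (807-836): 6 variabili per volume (con SWALLEN)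
  let indices := (PySem.List.pyRange 807 (min 837 n_features) 6).foldl (fun d i =>
    let d := if i < n_features then d.modify "Steam Partial-Pressure" [] (· ++ [i]) else d
    let d := if i+1 < n_features then d.modify "Hydrogen Partial-Pressure" [] (· ++ [i+1]) else d
    let d := if i+2 < n_features then d.modify "Void Fraction" [] (· ++ [i+2]) else d
    let d := if i+3 < n_features then d.modify "Gas Temperature" [] (· ++ [i+3]) else d
    let d := if i+4 < n_features then d.modify "Liquid Temperature" [] (· ++ [i+4]) else d
    let d := if i+5 < n_features then d.modify "Void Fraction SWALLEN" [] (· ++ [i+5]) else d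
    d) indices
  -- Volumi 166-233 (837-1176): 5 variabili per volume
  let indices := (PySem.List.pyRange 837 (min 1177 n_features) 5).foldl (fun d i =>
    let d := if i < n_features then d.modify "Steam Partial-Pressure" [] (· ++ [i]) else d
    let d := if i+1 < n_features then d.modify "Hydrogen Partial-Pressure" [] (· ++ [i+1]) else d
    let d := if i+2 < n_features then d.modify "Void Fraction" [] (· ++ [i+2]) else d
    let d := if i+3 < n_features then d.modify "Gas Temperature" [] (· ++ [i+3]) else d
    let d := if i+4 < n_features then d.modify "Liquid Temperature" [] (· ++ [i+4]) else d
    d) indices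
  -- Junction (1177-1794): 2 variabili per junction
  let indices := (PySem.List.pyRange 1177 (min 1795 n_features) 2).foldl (fun d i =>
    let d := if i < n_features then d.modify "Gas Velocity" [] (· ++ [i]) else d
    let d := if i+1 < n_features then d.modify "Liquid Speed" [] (· ++ [i+1]) else d
    d) indices
  -- Pumps (1795-1798): 1 variabile per pump
  let indices := (PySem.List.pyRange 1795 (min 1799 n_features) 1).foldl (fun d i =>
    let d := if i < n_features then d.modify "Rotary Speed" [] (· ++ [i]) else d
    d) indices
  -- Walls (1799-2232): 2 variabili per wall
  let indices := (PySem.List.pyRange 1799 (min n_features 2233) 2).foldl (fun d i =>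
    let d := if i < n_features then d.modify "Surface Temperature 1" [] (· ++ [i]) else d
    let d := if i+1 < n_features then d.modify "Surface Temperature 2" [] (· ++ [i+1]) else d
    d) indices
  indices.items

-- ===== PORT B =====
-- B-side helpers: the segment table (start, end_exclusive, block_size, categories)
def pvFive : List String :=
  ["Steam Partial-Pressure", "Hydrogen Partial-Pressure", "Void Fraction",
   "Gas Temperature", "Liquid Temperature"]
def pvSix : List String := pvFive ++ ["Void Fraction SWALLEN"]
def pvKeys : List String :=
  ["Steam Partial-Pressure", "Hydrogen Partial-Pressure", "Void Fraction",
   "Void Fraction SWALLEN", "Gas Temperature", "Liquid Temperature",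
   "Gas Velocity", "Liquid Speed", "Rotary Speed",
   "Surface Temperature 1", "Surface Temperature 2"]
def pvSegments : List (Int × Int × Int × List String) :=
  [(0, 390, 5, pvFive),
   (390, 402, 6, pvSix),
   (402, 807, 5, pvFive),
   (807, 837, 6, pvSix),
   (837, 1177, 5, pvFive),
   (1177, 1795, 2, ["Gas Velocity", "Liquid Speed"]),
   (1795, 1799, 1, ["Rotary Speed"]),
   (1799, 2233, 2, ["Surface Temperature 1", "Surface Temperature 2"])]

def get_astec_indices_alt (n_features : Int) : List (String × List Int) :=
  let indices : PySem.Dict String (List Int) :=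
    pvKeys.foldl (fun d k => d.insert k ([] : List Int)) PySem.Dict.empty
  let m := min n_features 2233
  (pvSegments.foldl (fun d seg =>
      (PySem.List.pyRange seg.1 (min seg.2.1 m) 1).foldl
        (fun d j =>
          d.modify (PySem.List.pyGetD seg.2.2.2 (PySem.Int.mod (j - seg.1) seg.2.2.1) "") []
            (· ++ [j])) d)
    indices).items

-- ===== PRECONDITION & SPEC =====
def Spec_get_astec_indices (n_features : Int) (out : List (String × List Int)) : Prop := out = get_astec_indices_alt n_features
instance (n_features : Int) (out : List (String × List Int)) : Decidable (Spec_get_astec_indices n_features out) := by unfold Spec_get_astec_indices; infer_instance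

-- ===== CLAIM (what is proved, stated in full; the proofs are below) =====
def Claim_equal_get_astec_indices : Prop := ∀ (n_features : Int), Dom_get_astec_indices n_features → Spec_get_astec_indices n_features (get_astec_indices n_features)

-- ===== LEMMAS AND PROOFS =====

-- named loop bodies (definitionally equal to the inline lambdas of the two ports)
def pvA5 (n : Int) (d : PySem.Dict String (List Int)) (i : Int) : PySem.Dict String (List Int) :=
  let d := if i < n then d.modify "Steam Partial-Pressure" [] (· ++ [i]) else d
  let d := if i+1 < n then d.modify "Hydrogen Partial-Pressure" [] (· ++ [i+1]) else d
  let d := if i+2 < n then d.modify "Void Fraction" [] (· ++ [i+2]) else d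
  let d := if i+3 < n then d.modify "Gas Temperature" [] (· ++ [i+3]) else d
  let d := if i+4 < n then d.modify "Liquid Temperature" [] (· ++ [i+4]) else d
  d

def pvA6 (n : Int) (d : PySem.Dict String (List Int)) (i : Int) : PySem.Dict String (List Int) :=
  let d := if i < n then d.modify "Steam Partial-Pressure" [] (· ++ [i]) else d
  let d := if i+1 < n then d.modify "Hydrogen Partial-Pressure" [] (· ++ [i+1]) else d
  let d := if i+2 < n then d.modify "Void Fraction" [] (· ++ [i+2]) else d
  let d := if i+3 < n then d.modify "Gas Temperature" [] (· ++ [i+3]) else d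
  let d := if i+4 < n then d.modify "Liquid Temperature" [] (· ++ [i+4]) else d
  let d := if i+5 < n then d.modify "Void Fraction SWALLEN" [] (· ++ [i+5]) else d
  d

def pvA2 (c0 c1 : String) (n : Int) (d : PySem.Dict String (List Int)) (i : Int) : PySem.Dict String (List Int) :=
  let d := if i < n then d.modify c0 [] (· ++ [i]) else d
  let d := if i+1 < n then d.modify c1 [] (· ++ [i+1]) else d
  d

def pvA1 (c0 : String) (n : Int) (d : PySem.Dict String (List Int)) (i : Int) : PySem.Dict String (List Int) :=
  let d := if i < n then d.modify c0 [] (· ++ [i]) else d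
  d

def pvB (cats : List String) (a0 s : Int) (d : PySem.Dict String (List Int)) (j : Int) : PySem.Dict String (List Int) :=
  d.modify (PySem.List.pyGetD cats (PySem.Int.mod (j - a0) s) "") [] (· ++ [j])

-- stepped-range induction forms
lemma pvRange_step_nil (a u s : Int) (hs : 0 < s) (h : u ≤ a) : PySem.List.pyRange a u s = [] := by
  rw [PySem.List.pyRange_of_pos _ _ hs, if_neg (by omega : ¬ a < u)]
  rfl

lemma pvRange_step_cons {a u s : Int} (hs : 0 < s) (h : a < u) :
    PySem.List.pyRange a u s = a :: PySem.List.pyRange (a+s) u s := by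
  rw [PySem.List.pyRange_of_pos _ _ hs, PySem.List.pyRange_of_pos _ _ hs]
  rw [if_pos h]
  have h1 : u - a + s - 1 = (u - a - 1) + s*1 := by ring
  rw [h1, Int.add_mul_ediv_left _ _ (by omega : s ≠ 0)]
  have hnn : 0 ≤ (u - a - 1) / s := Int.ediv_nonneg (by omega) (by omega)
  have h2 : ((u - a - 1)/s + 1).toNat = ((u-a-1)/s).toNat + 1 := by omega
  rw [h2, List.range_succ_eq_map, List.map_cons, List.map_map]
  congr 1
  · simp
  · by_cases h3 : a + s < u
    · rw [if_pos h3]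
      have h4 : u - (a+s) + s - 1 = u - a - 1 := by ring
      rw [h4]
      apply List.map_congr_left
      intro k _
      simp only [Function.comp]
      push_cast
      ring
    · rw [if_neg h3]
      have h5 : (u - a - 1)/s = 0 := Int.ediv_eq_zero_of_lt (by omega) (by omega)
      rw [h5]
      simp

-- the generic segment lemma: a stepped loop whose body equals, block by block,
-- the unit-stride loop, equals the unit-stride loop over the same interval
lemma pvGen (s u a0 : Int) (hs : 0 < s)
    (bodyA bodyB : PySem.Dict String (List Int) → Int → PySem.Dict String (List Int))
    (h : ∀ a, s ∣ (a - a0) → a < u → ∀ d,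
      bodyA d a = (PySem.List.pyRange a (min (a+s) u) 1).foldl bodyB d) :
    ∀ (k : Nat) (a : Int), s ∣ (a - a0) → u ≤ a + s * k → ∀ d,
      (PySem.List.pyRange a u s).foldl bodyA d = (PySem.List.pyRange a u 1).foldl bodyB d := by
  intro k
  induction k with
  | zero =>
    intro a hd hk d
    norm_num at hk
    rw [pvRange_step_nil a u s hs hk, PySem.List.pyRange_one_eq_nil hk]
    rfl
  | succ k ih =>
    intro a hd hk d
    by_cases hau : a < u
    · rw [pvRange_step_cons hs hau, List.foldl_cons]
      by_cases hfull : a + s ≤ u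
      · have hmid : min (a+s) u = a + s := by omega
        rw [PySem.List.pyRange_one_append a (a+s) u (by omega) (by omega), List.foldl_append]
        rw [h a hd hau d, hmid]
        apply ih (a+s)
        · have he : a + s - a0 = (a - a0) + s := by ring
          rw [he]
          exact dvd_add hd (dvd_refl s)
        · push_cast at hk
          calc u ≤ a + s * ((k:Int) + 1) := hk
            _ = a + s + s * (k:Int) := by ring
      · have hmid : min (a+s) u = u := by omega
        rw [pvRange_step_nil (a+s) u s hs (by omega), List.foldl_nil]
        rw [h a hd hau d, hmid]
    · rw [pvRange_step_nil a u s hs (by omega), PySem.List.pyRange_one_eq_nil (by omega)]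
      rfl

-- literal unit ranges
lemma pvR1 (a : Int) : PySem.List.pyRange a (a+1) 1 = [a] := PySem.List.pyRange_one_singleton a
lemma pvR2 (a : Int) : PySem.List.pyRange a (a+2) 1 = [a, a+1] := by
  rw [PySem.List.pyRange_one, show (a+2-a).toNat = 2 by omega]
  simp [show List.range 2 = [0,1] from rfl]
lemma pvR3 (a : Int) : PySem.List.pyRange a (a+3) 1 = [a, a+1, a+2] := by
  rw [PySem.List.pyRange_one, show (a+3-a).toNat = 3 by omega]
  simp [show List.range 3 = [0,1,2] from rfl]
lemma pvR4 (a : Int) : PySem.List.pyRange a (a+4) 1 = [a, a+1, a+2, a+3] := by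
  rw [PySem.List.pyRange_one, show (a+4-a).toNat = 4 by omega]
  simp [show List.range 4 = [0,1,2,3] from rfl]
lemma pvR5 (a : Int) : PySem.List.pyRange a (a+5) 1 = [a, a+1, a+2, a+3, a+4] := by
  rw [PySem.List.pyRange_one, show (a+5-a).toNat = 5 by omega]
  simp [show List.range 5 = [0,1,2,3,4] from rfl]
lemma pvR6 (a : Int) : PySem.List.pyRange a (a+6) 1 = [a, a+1, a+2, a+3, a+4, a+5] := by
  rw [PySem.List.pyRange_one, show (a+6-a).toNat = 6 by omega]
  simp [show List.range 6 = [0,1,2,3,4,5] from rfl]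

-- block-body agreement, shape by shape
set_option maxHeartbeats 1000000 in
lemma pvH5 (u a0 : Int) : ∀ a, (5:Int) ∣ (a - a0) → a < u → ∀ d,
    pvA5 u d a = (PySem.List.pyRange a (min (a+5) u) 1).foldl (pvB pvFive a0 5) d := by
  intro a hd hau d
  have m0 : PySem.Int.mod (a - a0) 5 = 0 := by
    rw [PySem.Int.mod_eq_emod_of_pos (by norm_num)]; omega
  have m1 : PySem.Int.mod (a + 1 - a0) 5 = 1 := by
    rw [PySem.Int.mod_eq_emod_of_pos (by norm_num)]; omega
  have m2 : PySem.Int.mod (a + 2 - a0) 5 = 2 := by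
    rw [PySem.Int.mod_eq_emod_of_pos (by norm_num)]; omega
  have m3 : PySem.Int.mod (a + 3 - a0) 5 = 3 := by
    rw [PySem.Int.mod_eq_emod_of_pos (by norm_num)]; omega
  have m4 : PySem.Int.mod (a + 4 - a0) 5 = 4 := by
    rw [PySem.Int.mod_eq_emod_of_pos (by norm_num)]; omega
  rcases (by omega : u = a+1 ∨ u = a+2 ∨ u = a+3 ∨ u = a+4 ∨ a+5 ≤ u) with h|h|h|h|h
  · subst h
    rw [show min (a+5) (a+1) = a+1 by omega, pvR1]
    simp only [pvA5, pvB, List.foldl_cons, List.foldl_nil, m0]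
    split_ifs <;> first | omega | rfl
  · subst h
    rw [show min (a+5) (a+2) = a+2 by omega, pvR2]
    simp only [pvA5, pvB, List.foldl_cons, List.foldl_nil, m0, m1]
    split_ifs <;> first | omega | rfl
  · subst h
    rw [show min (a+5) (a+3) = a+3 by omega, pvR3]
    simp only [pvA5, pvB, List.foldl_cons, List.foldl_nil, m0, m1, m2]
    split_ifs <;> first | omega | rfl
  · subst h
    rw [show min (a+5) (a+4) = a+4 by omega, pvR4]
    simp only [pvA5, pvB, List.foldl_cons, List.foldl_nil, m0, m1, m2, m3]
    split_ifs <;> first | omega | rfl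
  · rw [show min (a+5) u = a+5 by omega, pvR5]
    simp only [pvA5, pvB, List.foldl_cons, List.foldl_nil, m0, m1, m2, m3, m4]
    split_ifs <;> first | omega | rfl

set_option maxHeartbeats 1000000 in
lemma pvH6 (u a0 : Int) : ∀ a, (6:Int) ∣ (a - a0) → a < u → ∀ d,
    pvA6 u d a = (PySem.List.pyRange a (min (a+6) u) 1).foldl (pvB pvSix a0 6) d := by
  intro a hd hau d
  have m0 : PySem.Int.mod (a - a0) 6 = 0 := by
    rw [PySem.Int.mod_eq_emod_of_pos (by norm_num)]; omega
  have m1 : PySem.Int.mod (a + 1 - a0) 6 = 1 := by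
    rw [PySem.Int.mod_eq_emod_of_pos (by norm_num)]; omega
  have m2 : PySem.Int.mod (a + 2 - a0) 6 = 2 := by
    rw [PySem.Int.mod_eq_emod_of_pos (by norm_num)]; omega
  have m3 : PySem.Int.mod (a + 3 - a0) 6 = 3 := by
    rw [PySem.Int.mod_eq_emod_of_pos (by norm_num)]; omega
  have m4 : PySem.Int.mod (a + 4 - a0) 6 = 4 := by
    rw [PySem.Int.mod_eq_emod_of_pos (by norm_num)]; omega
  have m5 : PySem.Int.mod (a + 5 - a0) 6 = 5 := by
    rw [PySem.Int.mod_eq_emod_of_pos (by norm_num)]; omega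
  rcases (by omega : u = a+1 ∨ u = a+2 ∨ u = a+3 ∨ u = a+4 ∨ u = a+5 ∨ a+6 ≤ u) with h|h|h|h|h|h
  · subst h
    rw [show min (a+6) (a+1) = a+1 by omega, pvR1]
    simp only [pvA6, pvB, List.foldl_cons, List.foldl_nil, m0]
    split_ifs <;> first | omega | rfl
  · subst h
    rw [show min (a+6) (a+2) = a+2 by omega, pvR2]
    simp only [pvA6, pvB, List.foldl_cons, List.foldl_nil, m0, m1]
    split_ifs <;> first | omega | rfl
  · subst h
    rw [show min (a+6) (a+3) = a+3 by omega, pvR3]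
    simp only [pvA6, pvB, List.foldl_cons, List.foldl_nil, m0, m1, m2]
    split_ifs <;> first | omega | rfl
  · subst h
    rw [show min (a+6) (a+4) = a+4 by omega, pvR4]
    simp only [pvA6, pvB, List.foldl_cons, List.foldl_nil, m0, m1, m2, m3]
    split_ifs <;> first | omega | rfl
  · subst h
    rw [show min (a+6) (a+5) = a+5 by omega, pvR5]
    simp only [pvA6, pvB, List.foldl_cons, List.foldl_nil, m0, m1, m2, m3, m4]
    split_ifs <;> first | omega | rfl
  · rw [show min (a+6) u = a+6 by omega, pvR6]
    simp only [pvA6, pvB, List.foldl_cons, List.foldl_nil, m0, m1, m2, m3, m4, m5]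
    split_ifs <;> first | omega | rfl

set_option maxHeartbeats 1000000 in
lemma pvH2 (c0 c1 : String) (u a0 : Int) : ∀ a, (2:Int) ∣ (a - a0) → a < u → ∀ d,
    pvA2 c0 c1 u d a = (PySem.List.pyRange a (min (a+2) u) 1).foldl (pvB [c0, c1] a0 2) d := by
  intro a hd hau d
  have m0 : PySem.Int.mod (a - a0) 2 = 0 := by
    rw [PySem.Int.mod_eq_emod_of_pos (by norm_num)]; omega
  have m1 : PySem.Int.mod (a + 1 - a0) 2 = 1 := by
    rw [PySem.Int.mod_eq_emod_of_pos (by norm_num)]; omega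
  rcases (by omega : u = a+1 ∨ a+2 ≤ u) with h|h
  · subst h
    rw [show min (a+2) (a+1) = a+1 by omega, pvR1]
    simp only [pvA2, pvB, List.foldl_cons, List.foldl_nil, m0]
    split_ifs <;> first | omega | rfl
  · rw [show min (a+2) u = a+2 by omega, pvR2]
    simp only [pvA2, pvB, List.foldl_cons, List.foldl_nil, m0, m1]
    split_ifs <;> first | omega | rfl

set_option maxHeartbeats 1000000 in
lemma pvH1 (c0 : String) (u a0 : Int) : ∀ a, (1:Int) ∣ (a - a0) → a < u → ∀ d,
    pvA1 c0 u d a = (PySem.List.pyRange a (min (a+1) u) 1).foldl (pvB [c0] a0 1) d := by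
  intro a _ hau d
  have m0 : PySem.Int.mod (a - a0) 1 = 0 := by
    rw [PySem.Int.mod_eq_emod_of_pos (by norm_num)]; omega
  rw [show min (a+1) u = a+1 by omega, pvR1]
  simp only [pvA1, pvB, List.foldl_cons, List.foldl_nil, m0]
  split_ifs <;> first | omega | rfl

-- per-segment lemmas: A's stepped loop with bound min b n equals B's unit-stride scan
lemma pvSeg5 (n b a0 : Int) (k : Nat) (hd : (5:Int) ∣ (b - a0)) (hk : b ≤ a0 + 5 * (k:Int))
    (d : PySem.Dict String (List Int)) :
    (PySem.List.pyRange a0 (min b n) 5).foldl (pvA5 n) d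
      = (PySem.List.pyRange a0 (min b n) 1).foldl (pvB pvFive a0 5) d := by
  have hcong : (PySem.List.pyRange a0 (min b n) 5).foldl (pvA5 n) d
      = (PySem.List.pyRange a0 (min b n) 5).foldl (pvA5 (min b n)) d := by
    apply PySem.List.foldl_congr_mem
    intro acc x hx
    rw [PySem.List.mem_pyRange_iff_of_pos (by norm_num)] at hx
    obtain ⟨h1, h2, h3⟩ := hx
    simp only [pvA5,
      show (x < n) ↔ (x < min b n) from by constructor <;> intro <;> omega,
      show (x+1 < n) ↔ (x+1 < min b n) from by constructor <;> intro <;> omega,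
      show (x+2 < n) ↔ (x+2 < min b n) from by constructor <;> intro <;> omega,
      show (x+3 < n) ↔ (x+3 < min b n) from by constructor <;> intro <;> omega,
      show (x+4 < n) ↔ (x+4 < min b n) from by constructor <;> intro <;> omega]
  rw [hcong]
  exact pvGen 5 (min b n) a0 (by norm_num) _ _ (pvH5 (min b n) a0) k a0
    (by simp) (by omega) d

lemma pvSeg6 (n b a0 : Int) (k : Nat) (hd : (6:Int) ∣ (b - a0)) (hk : b ≤ a0 + 6 * (k:Int))
    (d : PySem.Dict String (List Int)) :
    (PySem.List.pyRange a0 (min b n) 6).foldl (pvA6 n) d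
      = (PySem.List.pyRange a0 (min b n) 1).foldl (pvB pvSix a0 6) d := by
  have hcong : (PySem.List.pyRange a0 (min b n) 6).foldl (pvA6 n) d
      = (PySem.List.pyRange a0 (min b n) 6).foldl (pvA6 (min b n)) d := by
    apply PySem.List.foldl_congr_mem
    intro acc x hx
    rw [PySem.List.mem_pyRange_iff_of_pos (by norm_num)] at hx
    obtain ⟨h1, h2, h3⟩ := hx
    simp only [pvA6,
      show (x < n) ↔ (x < min b n) from by constructor <;> intro <;> omega,
      show (x+1 < n) ↔ (x+1 < min b n) from by constructor <;> intro <;> omega,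
      show (x+2 < n) ↔ (x+2 < min b n) from by constructor <;> intro <;> omega,
      show (x+3 < n) ↔ (x+3 < min b n) from by constructor <;> intro <;> omega,
      show (x+4 < n) ↔ (x+4 < min b n) from by constructor <;> intro <;> omega,
      show (x+5 < n) ↔ (x+5 < min b n) from by constructor <;> intro <;> omega]
  rw [hcong]
  exact pvGen 6 (min b n) a0 (by norm_num) _ _ (pvH6 (min b n) a0) k a0
    (by simp) (by omega) d

lemma pvSeg2 (c0 c1 : String) (n b a0 : Int) (k : Nat) (hd : (2:Int) ∣ (b - a0)) (hk : b ≤ a0 + 2 * (k:Int))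
    (d : PySem.Dict String (List Int)) :
    (PySem.List.pyRange a0 (min b n) 2).foldl (pvA2 c0 c1 n) d
      = (PySem.List.pyRange a0 (min b n) 1).foldl (pvB [c0, c1] a0 2) d := by
  have hcong : (PySem.List.pyRange a0 (min b n) 2).foldl (pvA2 c0 c1 n) d
      = (PySem.List.pyRange a0 (min b n) 2).foldl (pvA2 c0 c1 (min b n)) d := by
    apply PySem.List.foldl_congr_mem
    intro acc x hx
    rw [PySem.List.mem_pyRange_iff_of_pos (by norm_num)] at hx
    obtain ⟨h1, h2, h3⟩ := hx
    simp only [pvA2,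
      show (x < n) ↔ (x < min b n) from by constructor <;> intro <;> omega,
      show (x+1 < n) ↔ (x+1 < min b n) from by constructor <;> intro <;> omega]
  rw [hcong]
  exact pvGen 2 (min b n) a0 (by norm_num) _ _ (pvH2 c0 c1 (min b n) a0) k a0
    (by simp) (by omega) d

lemma pvSeg1 (c0 : String) (n b a0 : Int) (k : Nat) (hk : b ≤ a0 + 1 * (k:Int))
    (d : PySem.Dict String (List Int)) :
    (PySem.List.pyRange a0 (min b n) 1).foldl (pvA1 c0 n) d
      = (PySem.List.pyRange a0 (min b n) 1).foldl (pvB [c0] a0 1) d := by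
  have hcong : (PySem.List.pyRange a0 (min b n) 1).foldl (pvA1 c0 n) d
      = (PySem.List.pyRange a0 (min b n) 1).foldl (pvA1 c0 (min b n)) d := by
    apply PySem.List.foldl_congr_mem
    intro acc x hx
    rw [PySem.List.mem_pyRange_iff_of_pos (by norm_num)] at hx
    obtain ⟨h1, h2, h3⟩ := hx
    simp only [pvA1,
      show (x < n) ↔ (x < min b n) from by constructor <;> intro <;> omega]
  rw [hcong]
  exact pvGen 1 (min b n) a0 (by norm_num) _ _ (pvH1 c0 (min b n) a0) k a0
    (by simp) (by omega) d

-- the two initial dicts agree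
set_option maxHeartbeats 1000000 in
lemma pvInit_eq :
    pvKeys.foldl (fun d k => d.insert k ([] : List Int)) PySem.Dict.empty
      = (PySem.Dict.ofList
          [("Steam Partial-Pressure", []), ("Hydrogen Partial-Pressure", []), ("Void Fraction", []),
           ("Void Fraction SWALLEN", []), ("Gas Temperature", []), ("Liquid Temperature", []),
           ("Gas Velocity", []), ("Liquid Speed", []), ("Rotary Speed", []),
           ("Surface Temperature 1", []), ("Surface Temperature 2", [])] :
          PySem.Dict String (List Int)) := by
  decide

-- bridges: each port written with the named loop bodies
lemma pvPortA (n : Int) : get_astec_indices n =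
    ((PySem.List.pyRange 1799 (min n 2233) 2).foldl (pvA2 "Surface Temperature 1" "Surface Temperature 2" n)
      ((PySem.List.pyRange 1795 (min 1799 n) 1).foldl (pvA1 "Rotary Speed" n)
        ((PySem.List.pyRange 1177 (min 1795 n) 2).foldl (pvA2 "Gas Velocity" "Liquid Speed" n)
          ((PySem.List.pyRange 837 (min 1177 n) 5).foldl (pvA5 n)
            ((PySem.List.pyRange 807 (min 837 n) 6).foldl (pvA6 n)
              ((PySem.List.pyRange 402 (min 807 n) 5).foldl (pvA5 n)
                ((PySem.List.pyRange 390 (min 402 n) 6).foldl (pvA6 n)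
                  ((PySem.List.pyRange 0 (min 390 n) 5).foldl (pvA5 n)
                    (PySem.Dict.ofList
                      [("Steam Partial-Pressure", []), ("Hydrogen Partial-Pressure", []), ("Void Fraction", []),
                       ("Void Fraction SWALLEN", []), ("Gas Temperature", []), ("Liquid Temperature", []),
                       ("Gas Velocity", []), ("Liquid Speed", []), ("Rotary Speed", []),
                       ("Surface Temperature 1", []), ("Surface Temperature 2", [])]))))))))).items := rfl

lemma pvPortB (n : Int) : get_astec_indices_alt n =
    ((PySem.List.pyRange 1799 (min 2233 (min n 2233)) 1).foldl (pvB ["Surface Temperature 1", "Surface Temperature 2"] 1799 2)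
      ((PySem.List.pyRange 1795 (min 1799 (min n 2233)) 1).foldl (pvB ["Rotary Speed"] 1795 1)
        ((PySem.List.pyRange 1177 (min 1795 (min n 2233)) 1).foldl (pvB ["Gas Velocity", "Liquid Speed"] 1177 2)
          ((PySem.List.pyRange 837 (min 1177 (min n 2233)) 1).foldl (pvB pvFive 837 5)
            ((PySem.List.pyRange 807 (min 837 (min n 2233)) 1).foldl (pvB pvSix 807 6)
              ((PySem.List.pyRange 402 (min 807 (min n 2233)) 1).foldl (pvB pvFive 402 5)
                ((PySem.List.pyRange 390 (min 402 (min n 2233)) 1).foldl (pvB pvSix 390 6)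
                  ((PySem.List.pyRange 0 (min 390 (min n 2233)) 1).foldl (pvB pvFive 0 5)
                    (pvKeys.foldl (fun d k => d.insert k ([] : List Int)) PySem.Dict.empty))))))))).items := rfl

-- ===== VERDICT (by name: the statement is the Claim_ definition above) =====
theorem get_astec_indices_spec : Claim_equal_get_astec_indices := by
  intro n _
  show get_astec_indices n = get_astec_indices_alt n
  rw [pvPortA, pvPortB, pvInit_eq]
  rw [show min 390 (min n 2233) = min 390 n by omega,
      show min 402 (min n 2233) = min 402 n by omega,
      show min 807 (min n 2233) = min 807 n by omega,
      show min 837 (min n 2233) = min 837 n by omega,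
      show min 1177 (min n 2233) = min 1177 n by omega,
      show min 1795 (min n 2233) = min 1795 n by omega,
      show min 1799 (min n 2233) = min 1799 n by omega,
      show min 2233 (min n 2233) = min 2233 n by omega,
      show min n 2233 = min 2233 n by omega]
  rw [pvSeg5 n 390 0 78 (by norm_num) (by norm_num),
      pvSeg6 n 402 390 2 (by norm_num) (by norm_num),
      pvSeg5 n 807 402 81 (by norm_num) (by norm_num),
      pvSeg6 n 837 807 5 (by norm_num) (by norm_num),
      pvSeg5 n 1177 837 68 (by norm_num) (by norm_num),
      pvSeg2 "Gas Velocity" "Liquid Speed" n 1795 1177 309 (by norm_num) (by norm_num),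
      pvSeg1 "Rotary Speed" n 1799 1795 4 (by norm_num),
      pvSeg2 "Surface Temperature 1" "Surface Temperature 2" n 2233 1799 217 (by norm_num) (by norm_num)]
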